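-- pv_equiv track=rewrite | github.com/Yaphel/py_interview_code | 剑指OFFER/字符串/替换空格.py | repeat_number_divide
-- ===== SOURCE A (Python) =====
-- def repeat_number_divide(str1): #Onlogn O1
--   rtn=''
--   str_len=len(str1)
--   for i in range(str_len):
--     if str1[i]==' ':
--       rtn=rtn+'!!SPACE!!'
--     else:
--       rtn=rtn+str1[i]
--   return rtn
-- ===== SOURCE B (Python) =====
-- def repeat_number_divide(str1):
--     return '!!SPACE!!'.join(str1.split(' '))
-- ===== Notes on version B (the rewrite author's own statement) =====
-- stated objective: idiomatic
-- what changed: Replaces the per-character index loop with quadratic string concatenation by a single split-on-space / join-with-marker decomposition.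
import Mathlib
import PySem

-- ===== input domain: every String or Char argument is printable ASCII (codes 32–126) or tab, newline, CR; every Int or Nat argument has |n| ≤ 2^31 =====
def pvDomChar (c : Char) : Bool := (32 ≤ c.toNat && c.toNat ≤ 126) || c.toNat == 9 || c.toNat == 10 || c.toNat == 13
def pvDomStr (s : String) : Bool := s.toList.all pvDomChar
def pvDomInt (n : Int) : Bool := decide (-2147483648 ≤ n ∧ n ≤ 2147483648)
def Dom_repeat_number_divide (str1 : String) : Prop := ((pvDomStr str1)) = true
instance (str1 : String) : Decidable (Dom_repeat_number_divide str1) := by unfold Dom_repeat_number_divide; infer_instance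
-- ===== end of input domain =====

-- B replaces A's per-character index loop (accumulating into a string) by the idiomatic
-- split-on-' ' / join-with-'!!SPACE!!' decomposition; return values proved equal for all strings.


-- ===== PORT A =====
-- for i in range(len(str1)): rtn += '!!SPACE!!' if str1[i]==' ' else str1[i]
-- (str1[i] is always in range, so pyGetD with a default is exact here)
def repeat_number_divide (str1 : String) : String :=
  String.ofList ((PySem.List.pyRange 0 (PySem.Str.len str1) 1).foldl
    (fun rtn i =>
      if PySem.List.pyGetD str1.toList i ' ' = ' ' then rtn ++ "!!SPACE!!".toList
      else rtn ++ [PySem.List.pyGetD str1.toList i ' ']) [])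

-- ===== PORT B =====
-- '!!SPACE!!'.join(str1.split(' '))  (split with a nonempty literal separator = Chars.splitOn)
def repeat_number_divide_alt (str1 : String) : String :=
  String.ofList (PySem.Chars.join "!!SPACE!!".toList (PySem.Chars.splitOn str1.toList [' ']))

-- ===== PRECONDITION & SPEC =====
def Spec_repeat_number_divide (str1 : String) (out : String) : Prop := out = repeat_number_divide_alt str1
instance (str1 : String) (out : String) : Decidable (Spec_repeat_number_divide str1 out) := by unfold Spec_repeat_number_divide; infer_instance

-- ===== CLAIM (what is proved, stated in full; the proofs are below) =====
def Claim_equal_repeat_number_divide : Prop := ∀ (str1 : String), Dom_repeat_number_divide str1 → Spec_repeat_number_divide str1 (repeat_number_divide str1)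

-- ===== LEMMAS AND PROOFS =====

-- what one character contributes to the output
def pvStep (c : Char) : List Char := if c = ' ' then "!!SPACE!!".toList else [c]

-- fuel-free specification of splitOn.go for the single-space separator
def pvSplit (pre : List Char) : List Char → List (List Char)
  | [] => [pre]
  | c :: rest => if c = ' ' then pre :: pvSplit [] rest else pvSplit (pre ++ [c]) rest

lemma pvSplit_ne_nil (pre : List Char) (cs : List Char) : pvSplit pre cs ≠ [] := by
  induction cs generalizing pre with
  | nil => simp [pvSplit]
  | cons c rest ih =>
    simp only [pvSplit]
    split_ifs
    · simp
    · exact ih _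

lemma go_eq_pvSplit (fuel : Nat) : ∀ (cs cur : List Char) (acc : List (List Char)),
    cs.length < fuel →
    PySem.Chars.splitOn.go [' '] fuel cs cur acc = acc.reverse ++ pvSplit cur.reverse cs := by
  induction fuel with
  | zero => intro cs cur acc h; omega
  | succ fuel ih =>
    intro cs cur acc h
    cases cs with
    | nil =>
      rw [PySem.Chars.splitOn.go]; simp [pvSplit]; omega
    | cons c rest =>
      by_cases hc : c = ' '
      · have hp : [' '].isPrefixOf (c :: rest) = true := by simp [hc, List.isPrefixOf]
        rw [PySem.Chars.splitOn.go]
        simp only [hp, if_pos, List.length_singleton, List.drop_one, List.tail_cons]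
        rw [ih rest [] (cur.reverse :: acc) (by simpa using Nat.lt_of_succ_lt_succ h)]
        simp [pvSplit, hc]
      · have hp : [' '].isPrefixOf (c :: rest) = false := by
          simp only [List.isPrefixOf]
          simp [Ne.symm hc]
        rw [PySem.Chars.splitOn.go]
        simp only [hp, Bool.false_eq_true, if_false]
        rw [ih rest (c :: cur) acc (by simpa using Nat.lt_of_succ_lt_succ h)]
        simp [pvSplit, hc]

lemma join_pvSplit (cs : List Char) : ∀ (pre : List Char),
    PySem.Chars.join "!!SPACE!!".toList (pvSplit pre cs) = pre ++ cs.flatMap pvStep := by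
  induction cs with
  | nil => intro pre; simp [pvSplit, PySem.Chars.join_singleton]
  | cons c rest ih =>
    intro pre
    by_cases hc : c = ' '
    · obtain ⟨q, qs, hq⟩ : ∃ q qs, pvSplit ([] : List Char) rest = q :: qs := by
        cases hs : pvSplit ([] : List Char) rest with
        | nil => exact absurd hs (pvSplit_ne_nil _ _)
        | cons q qs => exact ⟨q, qs, rfl⟩
      simp only [pvSplit, hc, if_pos]
      rw [hq, PySem.Chars.join_cons_cons, ← hq, ih]
      simp [List.flatMap_cons, pvStep]
    · simp only [pvSplit, hc, if_false, ih]
      simp [List.flatMap_cons, pvStep, hc]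

lemma splitOn_join (cs : List Char) :
    PySem.Chars.join "!!SPACE!!".toList (PySem.Chars.splitOn cs [' ']) = cs.flatMap pvStep := by
  rw [PySem.Chars.splitOn, go_eq_pvSplit (cs.length + 1) cs [] [] (Nat.lt_succ_self _)]
  simpa using join_pvSplit cs []

lemma portA_eq (str1 : String) :
    repeat_number_divide str1 = String.ofList (str1.toList.flatMap pvStep) := by
  unfold repeat_number_divide
  have h1 := PySem.List.foldl_pyRange_zero_pyGetD' str1.toList ' '
    (fun rtn c => if c = ' ' then rtn ++ "!!SPACE!!".toList else rtn ++ [c]) []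
  simp only [PySem.Str.len_eq] at h1 ⊢
  rw [h1]
  congr 1
  have : ∀ (rtn : List Char) (c : Char),
      (if c = ' ' then rtn ++ "!!SPACE!!".toList else rtn ++ [c]) = rtn ++ pvStep c := by
    intro rtn c; unfold pvStep; split_ifs <;> rfl
  simp only [this]
  exact PySem.List.foldl_append_eq_flatMap pvStep str1.toList []

-- ===== VERDICT (by name: the statement is the Claim_ definition above) =====
theorem repeat_number_divide_spec : Claim_equal_repeat_number_divide := by
  intro str1 _
  unfold Spec_repeat_number_divide repeat_number_divide_alt
  rw [portA_eq, splitOn_join]
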